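-- pv_equiv track=rewrite | github.com/Baptiste-01/Algo-et-opti | Livrable/code.py | voisinMinPoid
-- ===== SOURCE A (Python) =====
-- def voisinMinPoid(matrix_local, listeClient, cur):
--     poidMinTrajet = 0
--     nextVoisin = -1
--     for i in listeClient:
--         if matrix_local[cur][i] > 0 and (poidMinTrajet == 0 or matrix_local[cur][i] < poidMinTrajet):
--             nextVoisin = i
--             poidMinTrajet = matrix_local[cur][i]
--     return nextVoisin, poidMinTrajet
-- ===== SOURCE B (Python) =====
-- def voisinMinPoid(matrix_local, listeClient, cur):
--     order = sorted([i for i in listeClient if matrix_local[cur][i] > 0],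
--                    key=lambda i: matrix_local[cur][i])
--     if not order:
--         return -1, 0
--     return order[0], matrix_local[cur][order[0]]
-- ===== Notes on version B (the rewrite author's own statement) =====
-- stated objective: alternative
-- what changed: Replaced A's single accumulating scan (running min weight + best index in two variables) by stable-sorting the positive-weight neighbour indices by weight and taking the head of the sorted list; stability of sorted preserves A's earliest-index tie-breaking.
import Mathlib
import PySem

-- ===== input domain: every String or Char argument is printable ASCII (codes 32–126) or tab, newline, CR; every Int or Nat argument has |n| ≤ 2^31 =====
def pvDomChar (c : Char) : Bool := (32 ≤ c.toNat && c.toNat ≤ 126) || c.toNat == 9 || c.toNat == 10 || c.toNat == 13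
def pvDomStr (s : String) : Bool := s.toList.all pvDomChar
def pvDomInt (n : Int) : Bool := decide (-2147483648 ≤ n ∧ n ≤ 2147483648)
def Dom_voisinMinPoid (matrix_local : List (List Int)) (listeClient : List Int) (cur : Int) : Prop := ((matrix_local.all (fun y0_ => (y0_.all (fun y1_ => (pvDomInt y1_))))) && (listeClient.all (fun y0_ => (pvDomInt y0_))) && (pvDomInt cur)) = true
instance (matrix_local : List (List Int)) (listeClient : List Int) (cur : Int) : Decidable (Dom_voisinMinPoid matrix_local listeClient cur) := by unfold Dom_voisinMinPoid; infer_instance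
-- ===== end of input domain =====

-- B replaces A's inline accumulating loop by a stable sort of the positive-weight neighbour indices keyed by weight, then takes the head; objective: alternative algorithm, same result.


-- matrix_local[cur][i]; exact inside Pre_ (where both indexings succeed)
def pvW (matrix_local : List (List Int)) (cur i : Int) : Int :=
  ((PySem.List.pyGet? matrix_local cur).bind (fun r => PySem.List.pyGet? r i)).getD 0

-- ===== PORT A =====
def voisinMinPoid (matrix_local : List (List Int)) (listeClient : List Int) (cur : Int) : Int × Int :=
  -- loop state = (poidMinTrajet, nextVoisin)
  let st := listeClient.foldl
    (fun (st : Int × Int) i =>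
      if 0 < pvW matrix_local cur i ∧ (st.1 = 0 ∨ pvW matrix_local cur i < st.1)
      then (pvW matrix_local cur i, i) else st) (0, -1)
  (st.2, st.1)

-- ===== PORT B =====
def voisinMinPoid_alt (matrix_local : List (List Int)) (listeClient : List Int) (cur : Int) : Int × Int :=
  let order := PySem.List.sorted
    (listeClient.filter (fun i => decide (0 < pvW matrix_local cur i)))
    (fun i => pvW matrix_local cur i)
  match order with
  | [] => (-1, 0)
  | i :: _ => (i, pvW matrix_local cur i)

-- ===== PRECONDITION & SPEC =====
-- Pre_ excludes exactly the inputs where Python A raises IndexError: some i in listeClient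
-- for which matrix_local[cur] or matrix_local[cur][i] is out of range (Python negative indexing included).
def Pre_voisinMinPoid (matrix_local : List (List Int)) (listeClient : List Int) (cur : Int) : Prop :=
  ∀ i ∈ listeClient, ((PySem.List.pyGet? matrix_local cur).bind (fun r => PySem.List.pyGet? r i)).isSome = true
instance (matrix_local : List (List Int)) (listeClient : List Int) (cur : Int) : Decidable (Pre_voisinMinPoid matrix_local listeClient cur) := by unfold Pre_voisinMinPoid; infer_instance
def pvWitness_voisinMinPoid : List (List Int) × List Int × Int := ([[0, 3, 2], [1, 0, 4], [2, 2, 0]], [1, 2], 0)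

def Spec_voisinMinPoid (matrix_local : List (List Int)) (listeClient : List Int) (cur : Int) (out : Int × Int) : Prop := out = voisinMinPoid_alt matrix_local listeClient cur
instance (matrix_local : List (List Int)) (listeClient : List Int) (cur : Int) (out : Int × Int) : Decidable (Spec_voisinMinPoid matrix_local listeClient cur out) := by unfold Spec_voisinMinPoid; infer_instance

-- ===== CLAIM (what is proved, stated in full; the proofs are below) =====
def Claim_equal_voisinMinPoid : Prop := ∀ (matrix_local : List (List Int)) (listeClient : List Int) (cur : Int), Dom_voisinMinPoid matrix_local listeClient cur → Pre_voisinMinPoid matrix_local listeClient cur → Spec_voisinMinPoid matrix_local listeClient cur (voisinMinPoid matrix_local listeClient cur)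

-- ===== LEMMAS AND PROOFS =====

-- A's loop body, named so it can be compared in lockstep with a first-min option fold
def pvStepA (matrix_local : List (List Int)) (cur : Int) (st : Int × Int) (i : Int) : Int × Int :=
  if 0 < pvW matrix_local cur i ∧ (st.1 = 0 ∨ pvW matrix_local cur i < st.1)
  then (pvW matrix_local cur i, i) else st

-- running "first index of minimal key" fold
def pvStepM (key : Int → Int) (acc : Option Int) (x : Int) : Option Int :=
  match acc with
  | none => some x
  | some m => if key x < key m then some x else some m

-- head of an insertBy-built (stable, ascending) list is the running first-min
theorem pv_head_insertBy (key : Int → Int) (l : List Int) :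
    ∀ acc : List Int,
    (l.foldl (fun acc x => PySem.List.insertBy (fun a b => decide (key a < key b)) x acc) acc).head?
      = l.foldl (pvStepM key) acc.head? := by
  induction l with
  | nil => intro acc; rfl
  | cons x t ih =>
    intro acc
    simp only [List.foldl_cons]
    rw [ih]
    congr 1
    cases acc with
    | nil => rfl
    | cons m r =>
      simp only [PySem.List.insertBy, pvStepM, List.head?]
      by_cases h : key x < key m
      · rw [if_pos (by simpa using h), if_pos h]
      · rw [if_neg (by simpa using h), if_neg h]

-- Invariant: A's accumulator (poidMinTrajet, nextVoisin) and the first-min option fold over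
-- the filtered indices stay in lockstep ((0,-1) ↔ none, (w i, i) with 0 < w i ↔ some i).
theorem pv_loop_rel (matrix_local : List (List Int)) (cur : Int) :
    ∀ (l : List Int) (s : Int × Int) (acc : Option Int),
    ((s = (0, -1) ∧ acc = none) ∨ (0 < s.1 ∧ s.1 = pvW matrix_local cur s.2 ∧ acc = some s.2)) →
    ((l.foldl (pvStepA matrix_local cur) s = (0, -1) ∧
      (l.filter (fun i => decide (0 < pvW matrix_local cur i))).foldl
        (pvStepM (fun i => pvW matrix_local cur i)) acc = none) ∨
     (0 < (l.foldl (pvStepA matrix_local cur) s).1 ∧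
      (l.foldl (pvStepA matrix_local cur) s).1
        = pvW matrix_local cur (l.foldl (pvStepA matrix_local cur) s).2 ∧
      (l.filter (fun i => decide (0 < pvW matrix_local cur i))).foldl
        (pvStepM (fun i => pvW matrix_local cur i)) acc
        = some (l.foldl (pvStepA matrix_local cur) s).2)) := by
  intro l
  induction l with
  | nil => intro s acc h; simpa using h
  | cons i t ih =>
    intro s acc h
    simp only [List.foldl_cons, List.filter_cons]
    by_cases hw : 0 < pvW matrix_local cur i
    · rw [if_pos (by simpa using hw)]
      simp only [List.foldl_cons]
      rcases h with ⟨hs, ha⟩ | ⟨hs, hkey, ha⟩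
      · subst hs; subst ha
        have e1 : pvStepA matrix_local cur (0, -1) i = (pvW matrix_local cur i, i) := by
          unfold pvStepA; rw [if_pos ⟨hw, Or.inl rfl⟩]
        have e2 : pvStepM (fun j => pvW matrix_local cur j) none i = some i := rfl
        rw [e1, e2]
        exact ih _ _ (Or.inr ⟨hw, rfl, rfl⟩)
      · subst ha
        by_cases hlt : pvW matrix_local cur i < s.1
        · have e1 : pvStepA matrix_local cur s i = (pvW matrix_local cur i, i) := by
            unfold pvStepA; rw [if_pos ⟨hw, Or.inr hlt⟩]
          have e2 : pvStepM (fun j => pvW matrix_local cur j) (some s.2) i = some i := by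
            unfold pvStepM; simp only; rw [if_pos (by rw [← hkey]; exact hlt)]
          rw [e1, e2]
          exact ih _ _ (Or.inr ⟨hw, rfl, rfl⟩)
        · have e1 : pvStepA matrix_local cur s i = s := by
            unfold pvStepA
            rw [if_neg (by rintro ⟨-, h0 | h1⟩ <;> omega)]
          have e2 : pvStepM (fun j => pvW matrix_local cur j) (some s.2) i = some s.2 := by
            unfold pvStepM; simp only; rw [if_neg (by rw [← hkey]; exact hlt)]
          rw [e1, e2]
          exact ih _ _ (Or.inr ⟨hs, hkey, rfl⟩)
    · rw [if_neg (by simpa using hw)]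
      have e1 : pvStepA matrix_local cur s i = s := by
        unfold pvStepA; rw [if_neg (by rintro ⟨h0, -⟩; exact hw h0)]
      rw [e1]
      exact ih s acc h

-- ===== VERDICT (by name: the statement is the Claim_ definition above) =====
theorem voisinMinPoid_spec : Claim_equal_voisinMinPoid := by
  intro matrix_local listeClient cur _ _
  unfold Spec_voisinMinPoid
  show (((listeClient.foldl (pvStepA matrix_local cur) (0, -1)).2,
         (listeClient.foldl (pvStepA matrix_local cur) (0, -1)).1) : Int × Int)
    = voisinMinPoid_alt matrix_local listeClient cur
  simp only [voisinMinPoid_alt]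
  have hsort := PySem.List.sorted_eq_foldl_insertBy
    (listeClient.filter (fun i => decide (0 < pvW matrix_local cur i)))
    (fun i => pvW matrix_local cur i)
  have hhead := pv_head_insertBy (fun i => pvW matrix_local cur i)
    (listeClient.filter (fun i => decide (0 < pvW matrix_local cur i))) []
  simp only [List.head?_nil] at hhead
  rcases pv_loop_rel matrix_local cur listeClient (0, -1) none (Or.inl ⟨rfl, rfl⟩) with
    ⟨hr, ha⟩ | ⟨hr, hkey, ha⟩
  · rw [hr]
    rw [ha] at hhead
    rw [hsort] at *
    cases hm : (listeClient.filter (fun i => decide (0 < pvW matrix_local cur i))).foldl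
        (fun acc x => PySem.List.insertBy
          (fun a b => decide (pvW matrix_local cur a < pvW matrix_local cur b)) x acc) [] with
    | nil => rfl
    | cons y ys => rw [hm] at hhead; simp at hhead
  · rw [ha] at hhead
    rw [hsort] at *
    cases hm : (listeClient.filter (fun i => decide (0 < pvW matrix_local cur i))).foldl
        (fun acc x => PySem.List.insertBy
          (fun a b => decide (pvW matrix_local cur a < pvW matrix_local cur b)) x acc) [] with
    | nil => rw [hm] at hhead; simp at hhead
    | cons y ys =>
      rw [hm] at hhead
      simp only [List.head?] at hhead
      have hy : y = (listeClient.foldl (pvStepA matrix_local cur) (0, -1)).2 := by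
        injection hhead
      simp only [hy, ← hkey]
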